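-- PySemCore.lean, part 7 of 8 (source lines 2103-2624 of 3059): Dict: insertion-ordered association list with unique keys; lawfulness; dict extensionality and items/keys/values.
-- An excerpt: the file's own header and imports are repeated below, the enclosing namespaces are reopened, and the other parts are separate documents.
import Lean.Meta.Tactic.Simp.RegisterCommand
/-
PySem — Python-exact primitives for the program-equivalence environment (pv_equiv).

A Lean port of a Python function should compute what the Python computes on every
admitted input. Ports diverge from their Python almost always at a dozen built-ins
(negative indexing, slicing, // and % with a negative divisor, dict overwrite order,
int() parsing, stable sort, min/max ties, the whitespace/digit/case sets of str), not
in the algorithm. This module implements exactly those built-ins with CPython's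
semantics (reference: CPython 3.13), so a port can call them instead of re-inventing
them. Where Python RAISES, the primitive returns `Option` (none = the exception) and a
decidable side condition in `PySem.Raise` names the inputs on which it does not, for
the port's `Pre_`.

Core Lean plus one Lean-frontend module for the `pysem` simp-set registration (no Mathlib import): it compiles in about a minute wherever the grader runs.
Every definition is computable; the `@[simp]` lemmas and the bridge lemmas reduce the
primitives to the usual List/Int/String functions under the side condition that makes
them agree, so proofs about honest ports stay in familiar territory. String functions
are exact on the environment's stated input domain (printable ASCII); outside it the
Unicode tables are not modelled in this version.

GRADER CODE: kernel-checked, differentially tested against CPython (tests/), trusted.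
-/

/-- The `pysem` simp set: every PySem lemma (tagged at the end of PySem.lean — an attribute cannot be used in the module that
registers it), so `simp only [pysem]` / `simp [pysem, …]` tries the whole prelude book without the author knowing each name.
(This import is the one non-core dependency of this file; it costs ≈50 s of compile per container — a third tiny module would
avoid it and is the planned refinement.) -/
register_simp_attr pysem

namespace PySem

/-! ## Dict — insertion-ordered association list with unique keys -/

/-- Python `dict`: keys unique, iteration in insertion order, overwrite keeps the key's position. -/
structure Dict (κ : Type) (ν : Type) where
  items : _root_.List (κ × ν)
deriving Repr, DecidableEq, BEq

namespace Dict

variable {κ ν : Type} [BEq κ]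

def empty : Dict κ ν := ⟨[]⟩
instance : EmptyCollection (Dict κ ν) := ⟨empty⟩
/-- `d.get(k)` / `k in d` lookup; `none` = KeyError for `d[k]`. -/
def get? (d : Dict κ ν) (k : κ) : Option ν := (d.items.find? (fun p => p.1 == k)).map (·.2)
/-- `d.get(k, dflt)`. -/
def getD (d : Dict κ ν) (k : κ) (dflt : ν) : ν := (d.get? k).getD dflt
def contains (d : Dict κ ν) (k : κ) : Bool := d.items.any (fun p => p.1 == k)
/-- `d[k] = v`: replace in place if present (position kept), else append. -/
def insert (d : Dict κ ν) (k : κ) (v : ν) : Dict κ ν :=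
  if d.contains k then ⟨d.items.map fun p => if p.1 == k then (k, v) else p⟩ else ⟨d.items ++ [(k, v)]⟩
/-- `del d[k]` / `d.pop(k)` without the value; absent key leaves d unchanged (use `contains` for KeyError). -/
def erase (d : Dict κ ν) (k : κ) : Dict κ ν := ⟨d.items.filter fun p => !(p.1 == k)⟩
def pop? (d : Dict κ ν) (k : κ) : Option (ν × Dict κ ν) := (d.get? k).map fun v => (v, d.erase k)
def keys (d : Dict κ ν) : _root_.List κ := d.items.map (·.1)
def values (d : Dict κ ν) : _root_.List ν := d.items.map (·.2)
def size (d : Dict κ ν) : Nat := d.items.length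
/-- `d.setdefault(k, v)`. -/
def setdefault (d : Dict κ ν) (k : κ) (v : ν) : Dict κ ν := if d.contains k then d else ⟨d.items ++ [(k, v)]⟩
/-- `d[k] = f(d.get(k, dflt))` — the Counter/accumulate pattern (`d[k] = d.get(k, 0) + 1`). -/
def modify (d : Dict κ ν) (k : κ) (dflt : ν) (f : ν → ν) : Dict κ ν := d.insert k (f (d.getD k dflt))
/-- `dict(pairs)` / `d.update(pairs)`: later pairs overwrite earlier ones in place. -/
def update (d : Dict κ ν) (ps : _root_.List (κ × ν)) : Dict κ ν := ps.foldl (fun acc p => acc.insert p.1 p.2) d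
def ofList (ps : _root_.List (κ × ν)) : Dict κ ν := (empty : Dict κ ν).update ps

@[simp] theorem get?_empty (k : κ) : (empty : Dict κ ν).get? k = none := by simp [get?, empty]
@[simp] theorem getD_empty (k : κ) (d0 : ν) : (empty : Dict κ ν).getD k d0 = d0 := by simp [getD]
@[simp] theorem contains_empty (k : κ) : (empty : Dict κ ν).contains k = false := by simp [contains, empty]
omit [BEq κ] in @[simp] theorem size_empty : (empty : Dict κ ν).size = 0 := rfl
omit [BEq κ] in @[simp] theorem keys_empty : (empty : Dict κ ν).keys = [] := rfl

-- ---- the bridge lemmas ports kept re-deriving (insert/get?/contains under a lawful BEq)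
section Lawful
variable [LawfulBEq κ]

private theorem find?_map_upd_self (l : _root_.List (κ × ν)) (k : κ) (v : ν) (h : l.any (fun p => p.1 == k) = true) :
    (l.map (fun p => if p.1 == k then (k, v) else p)).find? (fun p => p.1 == k) = some (k, v) := by
  induction l with
  | nil => simp at h
  | cons p t ih =>
    simp only [_root_.List.map_cons, _root_.List.find?_cons]
    by_cases hp : (p.1 == k) = true
    · simp [hp]
    · have hp' : (p.1 == k) = false := by simpa using hp
      have h2 : t.any (fun p => p.1 == k) = true := by
        rw [_root_.List.any_cons, hp'] at h; simpa using h
      simpa [hp'] using ih h2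
private theorem find?_map_upd_ne (l : _root_.List (κ × ν)) (k k' : κ) (v : ν) (hne : (k' == k) = false) :
    (l.map (fun p => if p.1 == k then (k, v) else p)).find? (fun p => p.1 == k') = l.find? (fun p => p.1 == k') := by
  induction l with
  | nil => rfl
  | cons p t ih =>
    simp only [_root_.List.map_cons, _root_.List.find?_cons]
    by_cases hp : (p.1 == k) = true
    · have hpk : p.1 = k := by simpa using hp
      have h1 : (k == k') = false := by
        cases h : (k == k') <;> simp_all [beq_iff_eq]
      have h2 : (p.1 == k') = false := by rw [hpk]; exact h1
      simp [hp, h1, h2, ih]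
    · have hp' : (p.1 == k) = false := by simpa using hp
      simp [hp', ih]

/-- `d[k] = v; d[k]` is v. -/
@[simp] theorem get?_insert_self (d : Dict κ ν) (k : κ) (v : ν) : (d.insert k v).get? k = some v := by
  unfold insert get?
  by_cases h : d.contains k = true
  · simp only [h, if_true]; rw [find?_map_upd_self d.items k v (by simpa [contains] using h)]; rfl
  · have h' : d.contains k = false := by simpa using h
    have hn : d.items.find? (fun p => p.1 == k) = none := by
      rw [_root_.List.find?_eq_none]; intro p hp hpk
      have : d.items.any (fun p => p.1 == k) = true := _root_.List.any_eq_true.mpr ⟨p, hp, hpk⟩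
      simp [contains, this] at h'
    simp [h', _root_.List.find?_append, hn]
/-- `d[k] = v` leaves every other key's value alone. -/
theorem get?_insert_of_ne (d : Dict κ ν) {k k' : κ} (v : ν) (hne : k' ≠ k) : (d.insert k v).get? k' = d.get? k' := by
  have hb : (k' == k) = false := by simpa [beq_iff_eq] using hne
  unfold insert get?
  by_cases h : d.contains k = true
  · simp only [h, if_true]; rw [find?_map_upd_ne d.items k k' v hb]
  · have h' : d.contains k = false := by simpa using h
    have hb2 : (k == k') = false := by cases hh : (k == k') <;> simp_all [beq_iff_eq]
    simp [h', _root_.List.find?_append, hb2]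
@[simp] theorem getD_insert_self (d : Dict κ ν) (k : κ) (v d0 : ν) : (d.insert k v).getD k d0 = v := by simp [getD]
theorem getD_insert_of_ne (d : Dict κ ν) {k k' : κ} (v d0 : ν) (hne : k' ≠ k) : (d.insert k v).getD k' d0 = d.getD k' d0 := by
  simp [getD, get?_insert_of_ne d v hne]
@[simp] theorem contains_insert_self (d : Dict κ ν) (k : κ) (v : ν) : (d.insert k v).contains k = true := by
  have := get?_insert_self d k v
  unfold get? at this
  cases hf : (d.insert k v).items.find? (fun p => p.1 == k) with
  | none => simp [hf] at this
  | some p =>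
    have := _root_.List.find?_some hf
    exact _root_.List.any_eq_true.mpr ⟨p, _root_.List.mem_of_find?_eq_some hf, this⟩
theorem get?_eq_none_iff_contains (d : Dict κ ν) (k : κ) : d.get? k = none ↔ d.contains k = false := by
  simp only [get?, Option.map_eq_none_iff, _root_.List.find?_eq_none, contains]
  constructor
  · intro h; apply Bool.eq_false_iff.mpr; intro ha
    obtain ⟨p, hp, hk⟩ := _root_.List.any_eq_true.mp ha; exact absurd hk (by simpa using h p hp)
  · intro h p hp hk
    have : d.items.any (fun p => p.1 == k) = true := _root_.List.any_eq_true.mpr ⟨p, hp, hk⟩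
    simp [this] at h
/-- The Counter pattern: `d[k] = d.get(k, 0) + 1` then reading k. -/
@[simp] theorem getD_modify_self (d : Dict κ ν) (k : κ) (d0 : ν) (f : ν → ν) : (d.modify k d0 f).getD k d0 = f (d.getD k d0) := by
  simp [modify]
theorem getD_modify_of_ne (d : Dict κ ν) {k k' : κ} (d0 : ν) (f : ν → ν) (hne : k' ≠ k) : (d.modify k d0 f).getD k' d0 = d.getD k' d0 := by
  simp [modify, getD_insert_of_ne d _ d0 hne]
omit [LawfulBEq κ] in
private theorem any_key_iff (l : _root_.List (κ × ν)) (k : κ) [LawfulBEq κ] : l.any (fun p => p.1 == k) = true ↔ k ∈ l.map (·.1) := by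
  induction l with
  | nil => simp
  | cons p t ih =>
    simp only [_root_.List.any_cons, Bool.or_eq_true, _root_.List.map_cons, _root_.List.mem_cons, ih, beq_iff_eq]
    constructor <;> rintro (h | h) <;> simp_all
/-- `k in d` ↔ k is one of the keys. -/
theorem contains_iff_mem_keys (d : Dict κ ν) (k : κ) : d.contains k = true ↔ k ∈ d.keys := any_key_iff d.items k
/-- after `d[k] = v`, a key k' is present iff it is k or was present. -/
theorem contains_insert (d : Dict κ ν) (k k' : κ) (v : ν) : (d.insert k v).contains k' = (k' == k || d.contains k') := by
  by_cases hk : k' = k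
  · subst hk; simp
  · have hb : (k' == k) = false := by simpa [beq_iff_eq] using hk
    rw [hb, Bool.false_or]
    have h1 := get?_insert_of_ne d v hk
    cases hc : d.contains k' with
    | false =>
      have : d.get? k' = none := (get?_eq_none_iff_contains d k').mpr hc
      exact (get?_eq_none_iff_contains _ k').mp (h1.trans this)
    | true =>
      cases hf : (d.insert k v).contains k' with
      | true => rfl
      | false =>
        exfalso
        have := (get?_eq_none_iff_contains _ k').mpr hf
        rw [h1] at this
        have := (get?_eq_none_iff_contains d k').mp this
        simp [hc] at this
theorem mem_keys_insert (d : Dict κ ν) (k k' : κ) (v : ν) : k' ∈ (d.insert k v).keys ↔ k' = k ∨ k' ∈ d.keys := by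
  rw [← contains_iff_mem_keys, contains_insert, Bool.or_eq_true, ← contains_iff_mem_keys]; simp [beq_iff_eq]
omit [LawfulBEq κ] in @[simp] theorem keys_modify (d : Dict κ ν) (k : κ) (d0 : ν) (f : ν → ν) : (d.modify k d0 f).keys = (d.insert k (f (d.getD k d0))).keys := rfl
theorem contains_modify (d : Dict κ ν) (k k' : κ) (d0 : ν) (f : ν → ν) : (d.modify k d0 f).contains k' = (k' == k || d.contains k') := by
  simp [modify, contains_insert]
omit [LawfulBEq κ] in
private theorem find?_key_of_mem (l : _root_.List (κ × ν)) {k : κ} {v : ν} [LawfulBEq κ] (h : (k, v) ∈ l) (hnd : (l.map (·.1)).Nodup) :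
    (l.find? (fun p => p.1 == k)).map (·.2) = some v := by
  induction l with
  | nil => simp at h
  | cons p t ih =>
    simp only [_root_.List.map_cons, _root_.List.nodup_cons] at hnd
    rcases _root_.List.mem_cons.mp h with hp | ht
    · subst hp; simp
    · have hne : ¬ (p.1 == k) = true := by
        intro hb; have : p.1 = k := by simpa using hb
        exact hnd.1 (this ▸ _root_.List.mem_map.mpr ⟨(k, v), ht, rfl⟩)
      have hf : (p.1 == k) = false := by simpa using hne
      simp only [_root_.List.find?_cons, hf]
      exact ih ht hnd.2
/-- a pair in the items list is what get? returns for its key, provided keys are unique (true for every Dict built by insert/ofList/update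
from empty: see nodup_keys_*). -/
theorem get?_of_mem_items (d : Dict κ ν) {k : κ} {v : ν} (h : (k, v) ∈ d.items) (hnd : d.keys.Nodup) : d.get? k = some v :=
  find?_key_of_mem d.items h (by simpa [keys] using hnd)
end Lawful

theorem size_insert (d : Dict κ ν) (k : κ) (v : ν) : (d.insert k v).size = if d.contains k then d.size else d.size + 1 := by
  unfold insert size; split <;> simp

theorem keys_insert_of_not_contains (d : Dict κ ν) {k : κ} (v : ν) (h : d.contains k = false) :
    (d.insert k v).keys = d.keys ++ [k] := by
  simp [insert, h, keys]
theorem keys_insert_of_contains (d : Dict κ ν) {k : κ} (v : ν) (h : d.contains k = true) [LawfulBEq κ] :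
    (d.insert k v).keys = d.keys := by
  simp only [insert, h, if_true, keys, _root_.List.map_map]
  apply _root_.List.map_congr_left; intro p _
  by_cases hp : (p.1 == k) = true
  · have : p.1 = k := by simpa using hp
    simp [this]
  · have hp' : (p.1 == k) = false := by simpa using hp
    simp [hp']

theorem nodup_keys_insert [LawfulBEq κ] (d : Dict κ ν) (k : κ) (v : ν) (h : d.keys.Nodup) : (d.insert k v).keys.Nodup := by
  by_cases hc : d.contains k = true
  · rw [keys_insert_of_contains d v hc]; exact h
  · have hc' : d.contains k = false := by simpa using hc
    rw [keys_insert_of_not_contains d v hc', _root_.List.nodup_append]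
    refine ⟨h, by simp, ?_⟩
    intro a ha b hb
    simp at hb; subst hb
    intro hak; subst hak
    exact absurd ((contains_iff_mem_keys d a).mpr ha) (by simp [hc'])
theorem nodup_keys_update [LawfulBEq κ] (d : Dict κ ν) (ps : _root_.List (κ × ν)) (h : d.keys.Nodup) : (d.update ps).keys.Nodup := by
  unfold update
  induction ps generalizing d with
  | nil => simpa
  | cons p t ih => simp only [_root_.List.foldl_cons]; exact ih _ (nodup_keys_insert d p.1 p.2 h)
@[simp] theorem nodup_keys_ofList [LawfulBEq κ] (ps : _root_.List (κ × ν)) : (ofList ps : Dict κ ν).keys.Nodup := nodup_keys_update _ ps (by simp [keys, empty])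
omit [BEq κ] in @[simp] theorem nodup_keys_empty : (empty : Dict κ ν).keys.Nodup := by simp


-- ---- lemma pack 3: getD / get? after insert in 'if' form, items after insert, the Counter pattern, keys of a fold of inserts
theorem getD_eq_get?_getD (d : Dict κ ν) (k : κ) (d0 : ν) : d.getD k d0 = (d.get? k).getD d0 := rfl
theorem getD_of_get?_eq_some (d : Dict κ ν) {k : κ} {v : ν} (d0 : ν) (h : d.get? k = some v) : d.getD k d0 = v := by simp [getD, h]
theorem getD_of_get?_eq_none (d : Dict κ ν) {k : κ} (d0 : ν) (h : d.get? k = none) : d.getD k d0 = d0 := by simp [getD, h]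
/-- the items list after d[k] = v, both cases at once. -/
theorem items_insert (d : Dict κ ν) (k : κ) (v : ν) :
    (d.insert k v).items = if d.contains k then d.items.map (fun p => if p.1 == k then (k, v) else p) else d.items ++ [(k, v)] := by
  unfold insert; split <;> rfl
theorem items_insert_of_not_contains (d : Dict κ ν) {k : κ} (v : ν) (h : d.contains k = false) : (d.insert k v).items = d.items ++ [(k, v)] := by
  simp [items_insert, h]
theorem items_insert_of_contains (d : Dict κ ν) {k : κ} (v : ν) (h : d.contains k = true) :
    (d.insert k v).items = d.items.map (fun p => if p.1 == k then (k, v) else p) := by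
  simp [items_insert, h]
/-- a literal dict read at its head pair. -/
theorem get?_mk_cons (k : κ) (v : ν) (rest : _root_.List (κ × ν)) (x : κ) :
    (Dict.mk ((k, v) :: rest)).get? x = if k == x then some v else (Dict.mk rest).get? x := by
  simp only [get?, _root_.List.find?_cons]; split <;> simp_all
@[simp] theorem contains_mk (ps : _root_.List (κ × ν)) (k : κ) : (Dict.mk ps).contains k = ps.any (fun p => p.1 == k) := rfl
omit [BEq κ] in @[simp] theorem keys_mk (ps : _root_.List (κ × ν)) : (Dict.mk ps).keys = ps.map (·.1) := rfl
omit [BEq κ] in @[simp] theorem values_mk (ps : _root_.List (κ × ν)) : (Dict.mk ps).values = ps.map (·.2) := rfl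
/-- 'k in d' through the lookup. (rw-only — kept out of the `pysem` simp set, where with get?_eq_none_iff_contains and core's Option.isSome_eq_false_iff
it would cycle; inside the set `contains` normalises to keys-membership instead.) -/
theorem contains_eq_isSome_get? (d : Dict κ ν) (k : κ) : d.contains k = (d.get? k).isSome := by
  obtain ⟨items⟩ := d
  simp only [contains, get?, Option.isSome_map]
  induction items with
  | nil => rfl
  | cons p t ih => simp only [_root_.List.any_cons, _root_.List.find?_cons]; cases hp : (p.1 == k) <;> simp [ih]
theorem getD_of_not_contains (d : Dict κ ν) {k : κ} (d0 : ν) (h : d.contains k = false) : d.getD k d0 = d0 := by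
  rw [contains_eq_isSome_get?] at h; cases hg : d.get? k <;> simp_all [getD]

section Lawful3
variable [LawfulBEq κ]
/-- d[k] = v then d.get(k'), as one 'if'. -/
theorem get?_insert [DecidableEq κ] (d : Dict κ ν) (k k' : κ) (v : ν) : (d.insert k v).get? k' = if k' = k then some v else d.get? k' := by
  split
  · subst_vars; exact get?_insert_self d _ v
  · exact get?_insert_of_ne d v (by assumption)
theorem getD_insert [DecidableEq κ] (d : Dict κ ν) (k k' : κ) (v d0 : ν) : (d.insert k v).getD k' d0 = if k' = k then v else d.getD k' d0 := by
  split
  · subst_vars; exact getD_insert_self d _ v d0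
  · exact getD_insert_of_ne d v d0 (by assumption)
theorem getD_modify [DecidableEq κ] (d : Dict κ ν) (k k' : κ) (d0 : ν) (f : ν → ν) :
    (d.modify k d0 f).getD k' d0 = if k' = k then f (d.getD k d0) else d.getD k' d0 := by
  split
  · subst_vars; exact getD_modify_self d _ d0 f
  · exact getD_modify_of_ne d d0 f (by assumption)
theorem contains_eq_decide_mem_keys [DecidableEq κ] (d : Dict κ ν) (k : κ) : d.contains k = decide (k ∈ d.keys) := by
  apply Bool.eq_iff_iff.mpr; rw [contains_iff_mem_keys]; simp
/-- membership in the items after d[k] = v: the new pair, or an old pair with another key. -/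
theorem mem_items_insert (d : Dict κ ν) (k : κ) (v : ν) (p : κ × ν) :
    p ∈ (d.insert k v).items ↔ p = (k, v) ∨ (p ∈ d.items ∧ p.1 ≠ k) := by
  rw [items_insert]; split
  · rename_i hc
    rw [_root_.List.mem_map]
    constructor
    · rintro ⟨q, hq, rfl⟩
      cases hqk : (q.1 == k)
      · right; simp only [Bool.false_eq_true, ↓reduceIte]; exact ⟨hq, by simpa using hqk⟩
      · left; simp
    · rintro (rfl | ⟨hp, hne⟩)
      · have hc' : d.items.any (fun p => p.1 == k) = true := hc
        obtain ⟨q, hq, hqk⟩ := _root_.List.any_eq_true.mp hc'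
        exact ⟨q, hq, by simp [hqk]⟩
      · have hb : (p.1 == k) = false := by simpa using hne
        exact ⟨p, hp, by simp [hb]⟩
  · rename_i hc
    have hc' : d.contains k = false := by simpa using hc
    rw [_root_.List.mem_append, _root_.List.mem_singleton]
    constructor
    · rintro (hp | rfl)
      · right; refine ⟨hp, fun hpk => ?_⟩
        have : d.contains k = true := _root_.List.any_eq_true.mpr ⟨p, hp, by simp [hpk]⟩
        simp [hc'] at this
      · exact Or.inl rfl
    · rintro (rfl | ⟨hp, _⟩)
      · exact Or.inr rfl
      · exact Or.inl hp
theorem mem_items_insert_self (d : Dict κ ν) (k : κ) (v : ν) : (k, v) ∈ (d.insert k v).items := (mem_items_insert d k v _).mpr (Or.inl rfl)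
/-- a value after d[k] = v is v or an old value. -/
theorem mem_values_insert (d : Dict κ ν) (k : κ) (v w : ν) (h : w ∈ (d.insert k v).values) : w = v ∨ w ∈ d.values := by
  simp only [values, _root_.List.mem_map] at h ⊢
  obtain ⟨p, hp, rfl⟩ := h
  rcases (mem_items_insert d k v p).mp hp with rfl | ⟨hp', _⟩
  · exact Or.inl rfl
  · exact Or.inr ⟨p, hp', rfl⟩
/-- what get? returns is an item (no uniqueness needed in this direction). -/
theorem mem_items_of_get?_eq_some (d : Dict κ ν) {k : κ} {v : ν} (h : d.get? k = some v) : (k, v) ∈ d.items := by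
  simp only [get?, Option.map_eq_some_iff] at h
  obtain ⟨p, hp, rfl⟩ := h
  have hk : p.1 = k := by simpa using _root_.List.find?_some hp
  exact hk ▸ _root_.List.mem_of_find?_eq_some hp
theorem get?_eq_some_iff_mem_items (d : Dict κ ν) (k : κ) (v : ν) (hnd : d.keys.Nodup) : d.get? k = some v ↔ (k, v) ∈ d.items :=
  ⟨mem_items_of_get?_eq_some d, fun h => get?_of_mem_items d h hnd⟩
theorem getD_of_mem_items (d : Dict κ ν) {k : κ} {v : ν} (h : (k, v) ∈ d.items) (hnd : d.keys.Nodup) (d0 : ν) : d.getD k d0 = v := by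
  simp [getD, get?_of_mem_items d h hnd]
omit [BEq κ] [LawfulBEq κ] in theorem mem_keys_of_mem_items (d : Dict κ ν) {p : κ × ν} (h : p ∈ d.items) : p.1 ∈ d.keys := _root_.List.mem_map.mpr ⟨p, h, rfl⟩
theorem get?_eq_none_iff_not_mem_keys (d : Dict κ ν) (k : κ) : d.get? k = none ↔ k ∉ d.keys := by
  rw [get?_eq_none_iff_contains, ← contains_iff_mem_keys]; simp
/-- the keys after a loop of 'd[x] = …' over l are d's keys updated, AS A SET, with l (whatever the values). -/
theorem keys_foldl_insert (l : _root_.List κ) (f : Dict κ ν → κ → ν) (d : Dict κ ν) :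
    (l.foldl (fun d x => d.insert x (f d x)) d).keys = Set.update d.keys l := by
  induction l generalizing d with
  | nil => rfl
  | cons x t ih =>
    simp only [_root_.List.foldl_cons, Set.update_cons, ih]
    congr 1
    cases hc : d.contains x with
    | true => rw [keys_insert_of_contains d _ hc, Set.add_of_mem ((contains_iff_mem_keys d x).mp hc)]
    | false =>
      rw [keys_insert_of_not_contains d _ hc, Set.add_of_not_mem]
      rw [← contains_iff_mem_keys]; simp [hc]
/-- the same for a loop inserting under a key COMPUTED from the element ('for p in l: d[p[0]] = …'). -/
theorem keys_foldl_insert_key {β : Type} (l : _root_.List β) (key : β → κ) (f : Dict κ ν → β → ν) (d : Dict κ ν) :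
    (l.foldl (fun d x => d.insert (key x) (f d x)) d).keys = Set.update d.keys (l.map key) := by
  induction l generalizing d with
  | nil => rfl
  | cons x t ih =>
    simp only [_root_.List.foldl_cons, _root_.List.map_cons, Set.update_cons, ih]
    congr 1
    cases hc : d.contains (key x) with
    | true => rw [keys_insert_of_contains d _ hc, Set.add_of_mem ((contains_iff_mem_keys d _).mp hc)]
    | false =>
      rw [keys_insert_of_not_contains d _ hc, Set.add_of_not_mem]
      rw [← contains_iff_mem_keys]; simp [hc]
theorem keys_foldl_modify_key {β : Type} (l : _root_.List β) (key : β → κ) (d0 : ν) (f : Dict κ ν → β → ν → ν) (d : Dict κ ν) :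
    (l.foldl (fun d x => d.modify (key x) d0 (f d x)) d).keys = Set.update d.keys (l.map key) := keys_foldl_insert_key l key _ d
theorem keys_foldl_modify (l : _root_.List κ) (d0 : ν) (f : Dict κ ν → κ → ν → ν) (d : Dict κ ν) :
    (l.foldl (fun d x => d.modify x d0 (f d x)) d).keys = Set.update d.keys l := keys_foldl_insert l _ d
/-- THE COUNTER LOOP: 'for x in l: d[x] = d.get(x, 0) + 1' then 'd.get(v, 0)' is the old value plus l.count(v)  (Int / Nat values). -/
theorem getD_foldl_modify_add_one (l : _root_.List κ) (d : Dict κ _root_.Int) (v : κ) :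
    (l.foldl (fun d x => d.modify x 0 (· + 1)) d).getD v 0 = d.getD v 0 + (l.count v : _root_.Int) := by
  induction l generalizing d with
  | nil => simp
  | cons x t ih =>
    simp only [_root_.List.foldl_cons, ih, _root_.List.count_cons]
    by_cases h : v = x
    · subst h; rw [getD_modify_self]; simp; omega
    · rw [getD_modify_of_ne d 0 _ h]; have : (x == v) = false := by simpa [beq_iff_eq] using Ne.symm h
      simp [this]
theorem getD_foldl_insert_add_one (l : _root_.List κ) (d : Dict κ _root_.Int) (v : κ) :
    (l.foldl (fun d x => d.insert x (d.getD x 0 + 1)) d).getD v 0 = d.getD v 0 + (l.count v : _root_.Int) :=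
  getD_foldl_modify_add_one l d v
theorem getD_foldl_modify_add_one_nat (l : _root_.List κ) (d : Dict κ Nat) (v : κ) :
    (l.foldl (fun d x => d.modify x 0 (· + 1)) d).getD v 0 = d.getD v 0 + l.count v := by
  induction l generalizing d with
  | nil => simp
  | cons x t ih =>
    simp only [_root_.List.foldl_cons, ih, _root_.List.count_cons]
    by_cases h : v = x
    · subst h; rw [getD_modify_self]; simp; omega
    · rw [getD_modify_of_ne d 0 _ h]; have : (x == v) = false := by simpa [beq_iff_eq] using Ne.symm h
      simp [this]
/-- the grouping loop: 'for (k, x) in l: d[k] = d.get(k, []) + [x]' then 'd.get(c, [])'. -/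
theorem getD_foldl_modify_append {β : Type} (l : _root_.List (κ × β)) (d : Dict κ (_root_.List β)) (c : κ) :
    (l.foldl (fun d p => d.modify p.1 [] (· ++ [p.2])) d).getD c [] = d.getD c [] ++ (l.filter (fun p => p.1 == c)).map (·.2) := by
  induction l generalizing d with
  | nil => simp
  | cons p t ih =>
    simp only [_root_.List.foldl_cons, ih, _root_.List.filter_cons]
    by_cases h : c = p.1
    · subst h; rw [getD_modify_self]; simp
    · rw [getD_modify_of_ne d [] _ h]; have : (p.1 == c) = false := by simpa [beq_iff_eq] using Ne.symm h
      simp [this]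
end Lawful3

/-- Python 'collections.Counter(xs)' / the counting-dict idiom, as a Dict κ Int in first-occurrence key order. -/
def counter (xs : _root_.List κ) : Dict κ _root_.Int := xs.foldl (fun d x => d.modify x 0 (· + 1)) empty
theorem counter_eq_foldl (xs : _root_.List κ) : counter xs = xs.foldl (fun d x => d.modify x 0 (· + 1)) empty := rfl
/-- the insert-spelled counting loop IS counter (definitionally), so it rewrites to counter in one step. -/
theorem foldl_insert_getD_add_one_eq_counter (xs : _root_.List κ) : xs.foldl (fun d x => d.insert x (d.getD x 0 + 1)) empty = counter xs := rfl
theorem counter_append_singleton (xs : _root_.List κ) (x : κ) : counter (xs ++ [x]) = (counter xs).modify x 0 (· + 1) := by simp [counter]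
@[simp] theorem getD_counter [LawfulBEq κ] (xs : _root_.List κ) (v : κ) : (counter xs).getD v 0 = (xs.count v : _root_.Int) := by
  rw [counter, getD_foldl_modify_add_one]; simp
@[simp] theorem keys_counter [LawfulBEq κ] (xs : _root_.List κ) : (counter xs).keys = Set.ofList xs := by
  rw [counter, keys_foldl_modify]; rfl
theorem contains_counter [LawfulBEq κ] (xs : _root_.List κ) (v : κ) : (counter xs).contains v = xs.contains v := by
  apply Bool.eq_iff_iff.mpr; rw [contains_iff_mem_keys, keys_counter, Set.mem_ofList]; simp
theorem nodup_keys_counter [LawfulBEq κ] (xs : _root_.List κ) : (counter xs).keys.Nodup := by rw [keys_counter]; exact Set.nodup_ofList xs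
/-- Counter(xs).items(): each distinct element (first-occurrence order) with its count — the port of a function RETURNING a Counter. -/
theorem items_counter [LawfulBEq κ] (xs : _root_.List κ) : (counter xs).items = (Set.ofList xs).map (fun k => (k, (xs.count k : _root_.Int))) := by
  suffices H : ∀ (ys : _root_.List κ), (counter ys.reverse).items = (Set.ofList ys.reverse).map (fun k => (k, (ys.reverse.count k : _root_.Int))) by
    simpa using H xs.reverse
  intro ys
  induction ys with
  | nil => rfl
  | cons x u ih =>
    rw [_root_.List.reverse_cons]
    generalize u.reverse = t at ih ⊢
    rw [counter_append_singleton, Set.ofList_append_singleton, modify, items_insert]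
    have hg : (counter t).getD x 0 = (t.count x : _root_.Int) := getD_counter t x
    cases hc : (counter t).contains x with
    | true =>
      have hx : x ∈ Set.ofList t := by rw [← keys_counter]; exact (contains_iff_mem_keys _ _).mp hc
      simp only [↓reduceIte, ih, _root_.List.map_map, Set.add_of_mem hx, hg]
      apply _root_.List.map_congr_left; intro k hk
      by_cases hkx : k = x
      · subst hkx; simp [_root_.List.count_append]
      · have hb : (k == x) = false := by simpa using hkx
        have hb' : (x == k) = false := by simpa using (Ne.symm hkx)
        simp [hb, hb', _root_.List.count_append, _root_.List.count_cons]
    | false =>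
      have hx : x ∉ Set.ofList t := by rw [← keys_counter, ← contains_iff_mem_keys]; simp [hc]
      have hx' : x ∉ t := fun h => hx ((Set.mem_ofList t x).mpr h)
      simp only [Bool.false_eq_true, ↓reduceIte, ih, Set.add_of_not_mem hx, _root_.List.map_append, _root_.List.map_cons, _root_.List.map_nil, hg]
      congr 1
      · apply _root_.List.map_congr_left; intro k hk
        have hkx : k ≠ x := fun e => hx (e ▸ hk)
        have hb' : (x == k) = false := by simpa using (Ne.symm hkx)
        simp [_root_.List.count_append, _root_.List.count_cons, hb']
      · simp [_root_.List.count_append]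


/-! ### Lemma pack 4 — dict extensionality and items/keys/values, d[k]=v twice / in either order, setdefault, fresh-key insert loops, Nodup keys through loops -/
section Pack4
/- two dicts with the same items are equal: `attribute [ext]` generates `Dict.ext (h : d.items = d'.items) : d = d'` and `Dict.ext_iff`
   (generated, not stated, so the variable-headed `ext` stays out of the `pysem` simp set). -/
attribute [ext] Dict
private theorem setdefault_eq_ite (d : Dict κ ν) (k : κ) (v : ν) : d.setdefault k v = if d.contains k then d else d.insert k v := by
  unfold setdefault insert; split <;> simp_all
/-- d.setdefault(k, v) is 'if k in d: pass else: d[k] = v' — a present key leaves d alone, an absent one is d[k] = v (then every insert lemma applies). -/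
theorem setdefault_of_contains (d : Dict κ ν) {k : κ} (v : ν) (h : d.contains k = true) : d.setdefault k v = d := by
  simp [setdefault_eq_ite, h]
theorem setdefault_of_not_contains (d : Dict κ ν) {k : κ} (v : ν) (h : d.contains k = false) : d.setdefault k v = d.insert k v := by
  simp [setdefault_eq_ite, h]
variable [LawfulBEq κ]
/-- d[k] = v; d[k] = w is d[k] = w. -/
theorem insert_insert_self (d : Dict κ ν) (k : κ) (v w : ν) : (d.insert k v).insert k w = d.insert k w := by
  apply Dict.ext
  rw [items_insert_of_contains _ _ (contains_insert_self d k v), items_insert, items_insert]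
  split
  · rw [_root_.List.map_map]; apply _root_.List.map_congr_left; intro p _
    by_cases hp : (p.1 == k) = true <;> simp [hp]
  · rename_i hc
    rw [_root_.List.map_append, _root_.List.map_cons, _root_.List.map_nil]
    simp only [BEq.rfl, ↓reduceIte]
    congr 1
    conv => rhs; rw [← _root_.List.map_id d.items]
    apply _root_.List.map_congr_left; intro p hp
    have : (p.1 == k) = false := by
      apply Bool.eq_false_iff.mpr; intro hpk
      exact hc (_root_.List.any_eq_true.mpr ⟨p, hp, hpk⟩)
    simp [this]
/-- d[k] = v; d[k'] = v' for k ≠ k' READ the same either way round (the items lists differ in order — insertion order — so only lookups commute). -/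
theorem get?_insert_insert_comm [DecidableEq κ] (d : Dict κ ν) {k k' : κ} (v v' : ν) (hne : k ≠ k') (j : κ) :
    ((d.insert k v).insert k' v').get? j = ((d.insert k' v').insert k v).get? j := by
  simp only [get?_insert]; split <;> split <;> simp_all
theorem getD_insert_insert_comm [DecidableEq κ] (d : Dict κ ν) {k k' : κ} (v v' : ν) (hne : k ≠ k') (j : κ) (d0 : ν) :
    ((d.insert k v).insert k' v').getD j d0 = ((d.insert k' v').insert k v).getD j d0 := by
  simp only [getD, get?_insert_insert_comm d v v' hne]
theorem contains_insert_insert_comm (d : Dict κ ν) (k k' : κ) (v v' : ν) (j : κ) :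
    ((d.insert k v).insert k' v').contains j = ((d.insert k' v').insert k v).contains j := by
  simp only [contains_insert]; cases (j == k) <;> cases (j == k') <;> simp
/-- the keys stay duplicate-free through any loop of d[key(x)] = … (start from a dict with Nodup keys, e.g. empty / ofList / counter). -/
theorem nodup_keys_foldl_insert_key {β : Type} (l : _root_.List β) (key : β → κ) (f : Dict κ ν → β → ν) (d : Dict κ ν) (h : d.keys.Nodup) :
    (l.foldl (fun d x => d.insert (key x) (f d x)) d).keys.Nodup := by
  rw [keys_foldl_insert_key]; exact Set.nodup_update _ _ h
theorem nodup_keys_foldl_insert (l : _root_.List κ) (f : Dict κ ν → κ → ν) (d : Dict κ ν) (h : d.keys.Nodup) :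
    (l.foldl (fun d x => d.insert x (f d x)) d).keys.Nodup := by
  rw [keys_foldl_insert]; exact Set.nodup_update _ _ h
theorem nodup_keys_foldl_modify_key {β : Type} (l : _root_.List β) (key : β → κ) (d0 : ν) (f : Dict κ ν → β → ν → ν) (d : Dict κ ν) (h : d.keys.Nodup) :
    (l.foldl (fun d x => d.modify (key x) d0 (f d x)) d).keys.Nodup := nodup_keys_foldl_insert_key l key _ d h
/-- d.items() / d.values() read through the keys: each key paired with its looked-up value (keys unique). -/
theorem items_eq_map_keys (d : Dict κ ν) (hnd : d.keys.Nodup) (dflt : ν) : d.items = d.keys.map (fun k => (k, d.getD k dflt)) := by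
  rw [keys, _root_.List.map_map]
  conv => lhs; rw [← _root_.List.map_id d.items]
  apply _root_.List.map_congr_left; intro p hp
  obtain ⟨k, v⟩ := p
  simp [getD_of_mem_items d hp hnd dflt]
theorem values_eq_map_keys (d : Dict κ ν) (hnd : d.keys.Nodup) (dflt : ν) : d.values = d.keys.map (fun k => d.getD k dflt) := by
  rw [values, items_eq_map_keys d hnd dflt, _root_.List.map_map]; rfl
/-- a loop d[k(a)] = v(a) over FRESH, pairwise-distinct keys appends its pairs in order. -/
theorem items_foldl_insert_fresh {β : Type} (l : _root_.List β) (k : β → κ) (v : β → ν) (d : Dict κ ν)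
    (hdis : ∀ a ∈ l, d.contains (k a) = false) (hnd : (l.map k).Nodup) :
    (l.foldl (fun d a => d.insert (k a) (v a)) d).items = d.items ++ l.map (fun a => (k a, v a)) := by
  induction l generalizing d with
  | nil => simp
  | cons a t ih =>
    rw [_root_.List.map_cons, _root_.List.nodup_cons] at hnd
    rw [_root_.List.foldl_cons, ih _ _ hnd.2, items_insert_of_not_contains d _ (hdis a _root_.List.mem_cons_self)]
    · simp
    · intro b hb
      rw [contains_insert, hdis b (_root_.List.mem_cons_of_mem _ hb), Bool.or_false]
      have : k b ≠ k a := fun e => hnd.1 (e ▸ _root_.List.mem_map.mpr ⟨b, hb, rfl⟩)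
      simpa using this
theorem get?_setdefault_self (d : Dict κ ν) (k : κ) (v : ν) : (d.setdefault k v).get? k = some ((d.get? k).getD v) := by
  rw [setdefault_eq_ite]; split
  · rename_i h; rw [contains_eq_isSome_get?] at h
    cases hg : d.get? k with
    | none => simp [hg] at h
    | some w => rfl
  · rename_i h
    have h' : d.contains k = false := by simpa using h
    rw [get?_insert_self, (get?_eq_none_iff_contains d k).mpr h']; rfl
theorem get?_setdefault_of_ne (d : Dict κ ν) {k k' : κ} (v : ν) (hne : k' ≠ k) : (d.setdefault k v).get? k' = d.get? k' := by
  rw [setdefault_eq_ite]; split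
  · rfl
  · exact get?_insert_of_ne d v hne
theorem getD_setdefault_self (d : Dict κ ν) (k : κ) (v d0 : ν) : (d.setdefault k v).getD k d0 = d.getD k v := by
  simp [getD, get?_setdefault_self]
theorem contains_setdefault (d : Dict κ ν) (k k' : κ) (v : ν) : (d.setdefault k v).contains k' = (k' == k || d.contains k') := by
  rw [setdefault_eq_ite]; split
  · rename_i h; cases hk : (k' == k)
    · simp
    · have : k' = k := by simpa using hk
      subst this; simp [h]
  · exact contains_insert d k k' v
omit [LawfulBEq κ] in
theorem keys_setdefault (d : Dict κ ν) (k : κ) (v : ν) : (d.setdefault k v).keys = if d.contains k then d.keys else d.keys ++ [k] := by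
  rw [setdefault_eq_ite]; split
  · rfl
  · rename_i h; exact keys_insert_of_not_contains d v (by simpa using h)
end Pack4

end Dict

end PySem
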